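-- pv_equiv track=rewrite | github.com/everysoftware/algorithms-course | src/prefix_sums/box_filter.py | box_filter_ps
-- ===== SOURCE A (Python) =====
-- def box_filter_ps(m: int, image: list[list[int]]) -> list[list[int]]:
--     """Прямоугольное размытие изображения с использованием префиксных сумм. Сложность O(N^2)."""
--     n = len(image)
--     prefix_sums = [[0] * (n + 1) for _ in range(n + 1)]
--     blurred_image = [[0] * n for _ in range(n)]
--
--     # Вычисление префиксных сумм
--     for i in range(n):
--         for j in range(n):
--             prefix_sums[i + 1][j + 1] = (
--                 image[i][j]
--                 + prefix_sums[i][j + 1]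
--                 + prefix_sums[i + 1][j]
--                 - prefix_sums[i][j]
--             )
--
--     # Размытие изображения
--     for i in range(n):
--         for j in range(n):
--             # Координаты начала и конца прямоугольника
--             x1, y1 = max(0, i - m), max(0, j - m)
--             x2, y2 = min(n, i + m + 1), min(n, j + m + 1)
--
--             # Вычисление суммы и количества пикселей
--             total = (
--                 prefix_sums[x2][y2]
--                 - prefix_sums[x1][y2]
--                 - prefix_sums[x2][y1]
--                 + prefix_sums[x1][y1]
--             )
--             count = (x2 - x1) * (y2 - y1)
--             blurred_image[i][j] = total // count
--
--     return blurred_image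
-- ===== SOURCE B (Python) =====
-- def box_filter_ps(m: int, image: list[list[int]]) -> list[list[int]]:
--     """Box blur by direct summation of each clamped window (no prefix-sum table)."""
--     n = len(image)
--     blurred = []
--     for i in range(n):
--         x1, x2 = max(0, i - m), min(n, i + m + 1)
--         row = []
--         for j in range(n):
--             y1, y2 = max(0, j - m), min(n, j + m + 1)
--             total = sum(image[x][y] for x in range(x1, x2) for y in range(y1, y2))
--             row.append(total // ((x2 - x1) * (y2 - y1)))
--         blurred.append(row)
--     return blurred
-- ===== Notes on version B (the rewrite author's own statement) =====
-- stated objective: simpler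
-- what changed: B drops A's (n+1)x(n+1) prefix-sum table entirely and computes each output pixel by directly summing image[x][y] over the same clamped window, dividing by the same count.
-- outside the precondition, e.g. on box_filter_ps(-1, [[4]]): A returns [[4]], B returns [[0]]
import Mathlib
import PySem

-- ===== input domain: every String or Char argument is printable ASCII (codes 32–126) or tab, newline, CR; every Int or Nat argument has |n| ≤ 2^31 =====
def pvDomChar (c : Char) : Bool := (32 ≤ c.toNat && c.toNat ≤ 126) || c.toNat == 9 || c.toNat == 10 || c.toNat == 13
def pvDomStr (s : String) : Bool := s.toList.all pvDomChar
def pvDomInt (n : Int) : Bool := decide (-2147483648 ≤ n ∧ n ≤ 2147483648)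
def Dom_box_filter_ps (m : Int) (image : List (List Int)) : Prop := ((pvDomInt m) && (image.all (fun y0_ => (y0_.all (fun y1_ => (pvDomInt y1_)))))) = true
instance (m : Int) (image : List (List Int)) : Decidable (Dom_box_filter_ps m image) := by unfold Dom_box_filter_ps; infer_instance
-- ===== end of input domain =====

-- B replaces A's prefix-sum table by direct summation of each clamped window: simpler, no table (equal return values proved below).

-- ===== PORT A =====
-- 2-D read/write on a list-of-lists grid; exact for the nonnegative in-range
-- indices Python A uses on inputs admitted by Pre_ (short rows, where Python
-- raises IndexError, are excluded by Pre_).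
def pvGet2 (g : List (List Int)) (i j : Nat) : Int := (g.getD i []).getD j 0
def pvSet2 (g : List (List Int)) (i j : Nat) (v : Int) : List (List Int) :=
  g.set i ((g.getD i []).set j v)

def box_filter_ps (m : Int) (image : List (List Int)) : List (List Int) :=
  let n := image.length
  -- prefix_sums = [[0]*(n+1) for _ in range(n+1)], then the filling double loop (in-place writes become grid updates)
  let ps0 : List (List Int) := List.replicate (n + 1) (List.replicate (n + 1) (0 : Int))
  let ps := (List.range n).foldl (fun g i =>
      (List.range n).foldl (fun g j =>
        pvSet2 g (i + 1) (j + 1)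
          (pvGet2 image i j + pvGet2 g i (j + 1) + pvGet2 g (i + 1) j - pvGet2 g i j)) g) ps0
  -- blurred_image filled entry by entry, in the same order
  (List.range n).map (fun (i : Nat) =>
    (List.range n).map (fun (j : Nat) =>
      let x1 : Int := max 0 ((i : Int) - m)
      let y1 : Int := max 0 ((j : Int) - m)
      let x2 : Int := min (n : Int) ((i : Int) + m + 1)
      let y2 : Int := min (n : Int) ((j : Int) + m + 1)
      -- under Pre_ (0 ≤ m) these indices are nonnegative, so .toNat is exact
      let total := pvGet2 ps x2.toNat y2.toNat - pvGet2 ps x1.toNat y2.toNat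
                   - pvGet2 ps x2.toNat y1.toNat + pvGet2 ps x1.toNat y1.toNat
      PySem.Int.floordiv total ((x2 - x1) * (y2 - y1))))

-- ===== PORT B =====
-- image[x][y] for the nonnegative in-range indices B reaches under Pre_
def pvPix (image : List (List Int)) (x y : Int) : Int :=
  (image.getD x.toNat []).getD y.toNat 0

def box_filter_ps_alt (m : Int) (image : List (List Int)) : List (List Int) :=
  let n := image.length
  (List.range n).foldl (fun blurred (i : Nat) =>
    let x1 : Int := max 0 ((i : Int) - m)
    let x2 : Int := min (n : Int) ((i : Int) + m + 1)
    let row := (List.range n).foldl (fun row (j : Nat) =>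
      let y1 : Int := max 0 ((j : Int) - m)
      let y2 : Int := min (n : Int) ((j : Int) + m + 1)
      let total := (PySem.List.pyRange x1 x2 1).foldl (fun acc x =>
        (PySem.List.pyRange y1 y2 1).foldl (fun acc y => acc + pvPix image x y) acc) 0
      row ++ [PySem.Int.floordiv total ((x2 - x1) * (y2 - y1))]) []
    blurred ++ [row]) []

-- ===== PRECONDITION & SPEC =====
-- Pre_ excludes (a) images with a row shorter than len(image), on which Python A
-- raises IndexError, and (b) negative blur radius m, a meaningless corner on which
-- A's window bounds invert and its prefix-sum difference is an unspecified value
-- (B returns the empty-window sum 0 there).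
def Pre_box_filter_ps (m : Int) (image : List (List Int)) : Prop :=
  0 ≤ m ∧ ∀ row ∈ image, image.length ≤ row.length
instance (m : Int) (image : List (List Int)) : Decidable (Pre_box_filter_ps m image) := by
  unfold Pre_box_filter_ps; infer_instance

def pvWitness_box_filter_ps : Int × List (List Int) := (1, [[1, 2], [3, 4]])

def Spec_box_filter_ps (m : Int) (image : List (List Int)) (out : List (List Int)) : Prop := out = box_filter_ps_alt m image
instance (m : Int) (image : List (List Int)) (out : List (List Int)) : Decidable (Spec_box_filter_ps m image out) := by unfold Spec_box_filter_ps; infer_instance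

-- ===== CLAIM (what is proved, stated in full; the proofs are below) =====
def Claim_equal_box_filter_ps : Prop := ∀ (m : Int) (image : List (List Int)), Dom_box_filter_ps m image → Pre_box_filter_ps m image → Spec_box_filter_ps m image (box_filter_ps m image)

-- ===== LEMMAS AND PROOFS =====

-- the prefix grid A's double loop builds (proof-side name for A's fold)
def pvPsGrid (image : List (List Int)) : List (List Int) :=
  (List.range image.length).foldl (fun g i =>
    (List.range image.length).foldl (fun g j =>
      pvSet2 g (i + 1) (j + 1)
        (pvGet2 image i j + pvGet2 g i (j + 1) + pvGet2 g (i + 1) j - pvGet2 g i j)) g)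
    (List.replicate (image.length + 1) (List.replicate (image.length + 1) (0 : Int)))

theorem pvPsGrid_def (image : List (List Int)) :
    (List.range image.length).foldl (fun g i =>
      (List.range image.length).foldl (fun g j =>
        pvSet2 g (i + 1) (j + 1)
          (pvGet2 image i j + pvGet2 g i (j + 1) + pvGet2 g (i + 1) j - pvGet2 g i j)) g)
      (List.replicate (image.length + 1) (List.replicate (image.length + 1) (0 : Int)))
    = pvPsGrid image := rfl

-- mathematical 2-D prefix sum of the (0-defaulted) image
def pvP (image : List (List Int)) (x y : Nat) : Int :=
  ∑ i ∈ Finset.range x, ∑ j ∈ Finset.range y, pvGet2 image i j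

theorem pvP_zero_right (image : List (List Int)) (x : Nat) : pvP image x 0 = 0 := by
  simp [pvP]

theorem pvP_rec (image : List (List Int)) (i j : Nat) :
    pvP image (i + 1) (j + 1) =
      pvGet2 image i j + pvP image i (j + 1) + pvP image (i + 1) j - pvP image i j := by
  simp [pvP, Finset.sum_range_succ]
  ring

def pvShape (g : List (List Int)) (s : Nat) : Prop :=
  g.length = s ∧ ∀ r ∈ g, r.length = s

theorem pvGetD_set {α : Type} (l : List α) (i j : Nat) (v d : α) (hi : i < l.length) :
    (l.set i v).getD j d = if j = i then v else l.getD j d := by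
  simp only [List.getD_eq_getElem?_getD, List.getElem?_set]
  by_cases h : i = j
  · subst h
    simp [hi]
  · rw [if_neg h, if_neg (fun hh => h hh.symm)]

theorem pvShape_set2 (g : List (List Int)) (s i j : Nat) (v : Int) (h : pvShape g s)
    (hi : i < s) : pvShape (pvSet2 g i j v) s := by
  obtain ⟨hlen, hrows⟩ := h
  have hig : i < g.length := by omega
  constructor
  · simp [pvSet2, hlen]
  · intro r hr
    rcases List.mem_or_eq_of_mem_set hr with h' | h'
    · exact hrows r h'
    · subst h'
      rw [List.length_set, List.getD_eq_getElem g [] hig]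
      exact hrows _ (List.getElem_mem hig)

theorem pvGet2_set2 (g : List (List Int)) (s i j k l : Nat) (v : Int)
    (h : pvShape g s) (hi : i < s) (hj : j < s) :
    pvGet2 (pvSet2 g i j v) k l = if k = i ∧ l = j then v else pvGet2 g k l := by
  have hig : i < g.length := by have h1 := h.1; omega
  have hrow : (g.getD i []).length = s := by
    rw [List.getD_eq_getElem g [] hig]
    exact h.2 _ (List.getElem_mem hig)
  unfold pvGet2 pvSet2
  rw [pvGetD_set g i k _ [] hig]
  by_cases hk : k = i
  · rw [if_pos hk]
    rw [pvGetD_set _ j l v 0 (by rw [hrow]; omega)]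
    by_cases hl : l = j
    · simp [hk, hl]
    · simp [hk, hl]
  · rw [if_neg hk, if_neg (by tauto)]

-- loop invariant of A's filling loops: after outer rows < i are done and the
-- inner loop at row i has handled columns < j, entry (k,l) holds the prefix sum
-- when already written, else its initial 0
def pvInv (image g : List (List Int)) (i j : Nat) : Prop :=
  pvShape g (image.length + 1) ∧
  ∀ k l, k ≤ image.length → l ≤ image.length →
    pvGet2 g k l = if k ≤ i ∨ (k = i + 1 ∧ l ≤ j) then pvP image k l else 0

def pvOut (image g : List (List Int)) (I : Nat) : Prop :=
  pvShape g (image.length + 1) ∧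
  ∀ k l, k ≤ image.length → l ≤ image.length →
    pvGet2 g k l = if k ≤ I then pvP image k l else 0

theorem pvInv_step (image g : List (List Int)) (i j : Nat)
    (hi : i < image.length) (hj : j < image.length) (h : pvInv image g i j) :
    pvInv image
      (pvSet2 g (i + 1) (j + 1)
        (pvGet2 image i j + pvGet2 g i (j + 1) + pvGet2 g (i + 1) j - pvGet2 g i j))
      i (j + 1) := by
  obtain ⟨hs, hv⟩ := h
  refine ⟨pvShape_set2 g _ _ _ _ hs (by omega), ?_⟩
  intro k l hk hl
  rw [pvGet2_set2 g (image.length + 1) (i + 1) (j + 1) k l _ hs (by omega) (by omega)]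
  by_cases hkl : k = i + 1 ∧ l = j + 1
  · rw [if_pos hkl]
    obtain ⟨hk', hl'⟩ := hkl
    subst hk'; subst hl'
    rw [hv i (j + 1) (by omega) (by omega), if_pos (by omega),
        hv (i + 1) j (by omega) (by omega), if_pos (by omega),
        hv i j (by omega) (by omega), if_pos (by omega),
        if_pos (by omega), pvP_rec]
  · rw [if_neg hkl, hv k l hk hl]
    split_ifs <;> first | rfl | (exfalso; omega)

theorem pvInv_inner (image : List (List Int)) (i : Nat) (hi : i < image.length) :
    ∀ (len s : Nat) (g : List (List Int)), s + len ≤ image.length → pvInv image g i s →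
    pvInv image
      ((List.range' s len).foldl (fun g j =>
        pvSet2 g (i + 1) (j + 1)
          (pvGet2 image i j + pvGet2 g i (j + 1) + pvGet2 g (i + 1) j - pvGet2 g i j)) g)
      i (s + len) := by
  intro len
  induction len with
  | zero => intro s g _ h; simpa using h
  | succ len ih =>
    intro s g hle h
    rw [List.range'_succ, List.foldl_cons]
    have h1 := pvInv_step image g i s hi (by omega) h
    have h2 := ih (s + 1) _ (by omega) h1
    have hs : s + (len + 1) = (s + 1) + len := by omega
    rw [hs]
    exact h2

theorem pvOut_of_inv (image g : List (List Int)) (i : Nat)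
    (h : pvInv image g i image.length) : pvOut image g (i + 1) := by
  refine ⟨h.1, fun k l hk hl => ?_⟩
  rw [h.2 k l hk hl]
  split_ifs <;> first | rfl | (exfalso; omega)

theorem pvInv_of_out (image g : List (List Int)) (i : Nat)
    (h : pvOut image g i) : pvInv image g i 0 := by
  refine ⟨h.1, fun k l hk hl => ?_⟩
  rw [h.2 k l hk hl]
  split_ifs with h1 h2
  · rfl
  · exfalso; omega
  · have hl0 : l = 0 := by omega
    subst hl0
    exact (pvP_zero_right image k).symm
  · rfl

theorem pvOut_outer (image : List (List Int)) :
    ∀ (len s : Nat) (g : List (List Int)), s + len ≤ image.length → pvOut image g s →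
    pvOut image
      ((List.range' s len).foldl (fun g i =>
        (List.range image.length).foldl (fun g j =>
          pvSet2 g (i + 1) (j + 1)
            (pvGet2 image i j + pvGet2 g i (j + 1) + pvGet2 g (i + 1) j - pvGet2 g i j)) g) g)
      (s + len) := by
  intro len
  induction len with
  | zero => intro s g _ h; simpa using h
  | succ len ih =>
    intro s g hle h
    rw [List.range'_succ, List.foldl_cons]
    have h1 := pvInv_of_out image g s h
    have h2 := pvInv_inner image s (by omega) image.length 0 g (by omega) h1
    rw [Nat.zero_add, ← List.range_eq_range'] at h2
    have h3 := pvOut_of_inv image _ s h2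
    have h4 := ih (s + 1) _ (by omega) h3
    have hs : s + (len + 1) = (s + 1) + len := by omega
    rw [hs]
    exact h4

theorem pvOut_init (image : List (List Int)) :
    pvOut image (List.replicate (image.length + 1) (List.replicate (image.length + 1) (0 : Int))) 0 := by
  constructor
  · exact ⟨by simp, fun r hr => by rw [List.eq_of_mem_replicate hr]; simp⟩
  · intro k l hk hl
    have h1 : pvGet2 (List.replicate (image.length + 1) (List.replicate (image.length + 1) (0 : Int))) k l = 0 := by
      simp [pvGet2, List.getD_eq_getElem?_getD, List.getElem?_replicate]
      split_ifs <;> simp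
    rw [h1]
    split_ifs with h2
    · have hk0 : k = 0 := by omega
      subst hk0
      simp [pvP]
    · rfl

-- the prefix grid A builds is pvP everywhere
theorem pvPs_correct (image : List (List Int)) (k l : Nat)
    (hk : k ≤ image.length) (hl : l ≤ image.length) :
    pvGet2 (pvPsGrid image) k l = pvP image k l := by
  have h0 := pvOut_init image
  have h1 := pvOut_outer image image.length 0 _ (by omega) h0
  rw [Nat.zero_add, ← List.range_eq_range', pvPsGrid_def image] at h1
  rw [h1.2 k l hk hl, if_pos hk]

theorem pvSum_map_range (f : Nat → Int) (n : Nat) :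
    ((List.range n).map f).sum = ∑ k ∈ Finset.range n, f k := by
  induction n with
  | zero => simp
  | succ n ih => simp [List.range_succ, Finset.sum_range_succ, ih]

theorem pvRange_diff (f : Nat → Int) (a b : Nat) (hab : a ≤ b) :
    ∑ i ∈ Finset.range b, f i - ∑ i ∈ Finset.range a, f i
      = ∑ k ∈ Finset.range (b - a), f (a + k) := by
  obtain ⟨md, rfl⟩ : ∃ md, b = a + md := ⟨b - a, by omega⟩
  rw [Finset.sum_range_add]
  simp

-- inclusion–exclusion: the clamped-window sum equals A's four-corner difference
theorem pvWindow (image : List (List Int)) (a b c d : Nat) (hab : a ≤ b) (hcd : c ≤ d) :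
    ∑ k ∈ Finset.range (b - a), ∑ l ∈ Finset.range (d - c), pvGet2 image (a + k) (c + l)
      = pvP image b d - pvP image a d - pvP image b c + pvP image a c := by
  have h1 := pvRange_diff (fun i => ∑ j ∈ Finset.range d, pvGet2 image i j) a b hab
  have h2 := pvRange_diff (fun i => ∑ j ∈ Finset.range c, pvGet2 image i j) a b hab
  have h3 : ∑ k ∈ Finset.range (b - a), ∑ l ∈ Finset.range (d - c), pvGet2 image (a + k) (c + l)
      = ∑ k ∈ Finset.range (b - a),
          ((∑ j ∈ Finset.range d, pvGet2 image (a + k) j)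
            - ∑ j ∈ Finset.range c, pvGet2 image (a + k) j) :=
    Finset.sum_congr rfl fun k _ => (pvRange_diff (fun j => pvGet2 image (a + k) j) c d hcd).symm
  rw [h3, Finset.sum_sub_distrib]
  simp only [pvP]
  linarith [h1, h2]

-- B's nested fold over the window is that window sum
theorem pvAltTotal (image : List (List Int)) (x1 x2 y1 y2 : Int)
    (hx1 : 0 ≤ x1) (hy1 : 0 ≤ y1) :
    (PySem.List.pyRange x1 x2 1).foldl (fun acc x =>
      (PySem.List.pyRange y1 y2 1).foldl (fun acc y => acc + pvPix image x y) acc) 0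
    = ∑ k ∈ Finset.range (x2 - x1).toNat, ∑ l ∈ Finset.range (y2 - y1).toNat,
        pvGet2 image (x1.toNat + k) (y1.toNat + l) := by
  simp only [PySem.List.foldl_add]
  rw [PySem.List.pyRange_one x1 x2, PySem.List.pyRange_one y1 y2]
  simp only [List.map_map, Function.comp_def]
  rw [Int.zero_add, pvSum_map_range]
  refine Finset.sum_congr rfl fun k hk => ?_
  rw [pvSum_map_range]
  refine Finset.sum_congr rfl fun l hl => ?_
  simp only [pvPix, pvGet2]
  have h1 : (x1 + (k : Int)).toNat = x1.toNat + k := by omega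
  have h2 : (y1 + (l : Int)).toNat = y1.toNat + l := by omega
  rw [h1, h2]

-- the totals A and B divide are equal
theorem pvTotals (image : List (List Int)) (x1 x2 y1 y2 : Int)
    (hx1 : 0 ≤ x1) (hx12 : x1 ≤ x2) (hx2 : x2 ≤ (image.length : Int))
    (hy1 : 0 ≤ y1) (hy12 : y1 ≤ y2) (hy2 : y2 ≤ (image.length : Int)) :
    pvGet2 (pvPsGrid image) x2.toNat y2.toNat - pvGet2 (pvPsGrid image) x1.toNat y2.toNat
      - pvGet2 (pvPsGrid image) x2.toNat y1.toNat + pvGet2 (pvPsGrid image) x1.toNat y1.toNat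
    = (PySem.List.pyRange x1 x2 1).foldl (fun acc x =>
        (PySem.List.pyRange y1 y2 1).foldl (fun acc y => acc + pvPix image x y) acc) 0 := by
  rw [pvAltTotal image x1 x2 y1 y2 hx1 hy1]
  have hb : (x2 - x1).toNat = x2.toNat - x1.toNat := by omega
  have hd : (y2 - y1).toNat = y2.toNat - y1.toNat := by omega
  rw [hb, hd, pvWindow image x1.toNat x2.toNat y1.toNat y2.toNat (by omega) (by omega)]
  rw [pvPs_correct image x2.toNat y2.toNat (by omega) (by omega),
      pvPs_correct image x1.toNat y2.toNat (by omega) (by omega),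
      pvPs_correct image x2.toNat y1.toNat (by omega) (by omega),
      pvPs_correct image x1.toNat y1.toNat (by omega) (by omega)]

-- ===== VERDICT (by name: the statement is the Claim_ definition above) =====
theorem box_filter_ps_spec : Claim_equal_box_filter_ps := by
  intro m image _ hpre
  obtain ⟨hm, -⟩ := hpre
  show box_filter_ps m image = box_filter_ps_alt m image
  unfold box_filter_ps box_filter_ps_alt
  simp only [PySem.List.foldl_append_singleton_eq_map, List.nil_append]
  rw [pvPsGrid_def]
  refine List.map_congr_left fun i hi => ?_
  rw [List.mem_range] at hi
  refine List.map_congr_left fun j hj => ?_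
  rw [List.mem_range] at hj
  have hi' : (i : Int) < (image.length : Int) := by exact_mod_cast hi
  have hj' : (j : Int) < (image.length : Int) := by exact_mod_cast hj
  congr 1
  exact pvTotals image (max 0 ((i : Int) - m)) (min (image.length : Int) ((i : Int) + m + 1))
    (max 0 ((j : Int) - m)) (min (image.length : Int) ((j : Int) + m + 1))
    (by omega) (by omega) (by omega) (by omega) (by omega) (by omega)
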